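-- pv_equiv track=rewrite | github.com/canzarlab/McSplicer | python_scripts/McSplicer.py | filter_subpath_list_by_subexon_ids
-- ===== SOURCE A (Python) =====
-- def filter_subpath_list_by_subexon_ids(subpath_list, subpath_freq_list, subexon_ids):
--     indices = []
--     for i in range(len(subpath_list)):
--         if set(subpath_list[i]) <= set(subexon_ids):
--             indices.append(i)
--     subset_subpath_list = [subpath_list[idx] for idx in indices]
--     subset_subpath_freq_list = [subpath_freq_list[idx] for idx in indices]
--     return subset_subpath_list,subset_subpath_freq_list
-- ===== SOURCE B (Python) =====
-- def filter_subpath_list_by_subexon_ids(subpath_list, subpath_freq_list, subexon_ids):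
--     ids = sorted(subexon_ids)
--     n = len(ids)
--
--     def _contains(x):
--         lo, hi = 0, n
--         while lo < hi:
--             mid = (lo + hi) // 2
--             if ids[mid] < x:
--                 lo = mid + 1
--             else:
--                 hi = mid
--         return lo < n and ids[lo] == x
--
--     subset_subpath_list = []
--     subset_subpath_freq_list = []
--     for subpath, freq in zip(subpath_list, subpath_freq_list):
--         if all(_contains(x) for x in subpath):
--             subset_subpath_list.append(subpath)
--             subset_subpath_freq_list.append(freq)
--     return subset_subpath_list, subset_subpath_freq_list
-- ===== Notes on version B (the rewrite author's own statement) =====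
-- stated objective: faster
-- what changed: Replaces A's per-subpath set(subexon_ids) rebuild, index table and two indexed gather passes by a sorted-array membership structure: subexon_ids is sorted once, each node is tested by hand-written binary search, and one loop over zip(subpath_list, subpath_freq_list) builds both outputs directly.
-- outside the precondition, e.g. on filter_subpath_list_by_subexon_ids([[1]], [], [1]): A raises IndexError, B returns ([], [])
import Mathlib
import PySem

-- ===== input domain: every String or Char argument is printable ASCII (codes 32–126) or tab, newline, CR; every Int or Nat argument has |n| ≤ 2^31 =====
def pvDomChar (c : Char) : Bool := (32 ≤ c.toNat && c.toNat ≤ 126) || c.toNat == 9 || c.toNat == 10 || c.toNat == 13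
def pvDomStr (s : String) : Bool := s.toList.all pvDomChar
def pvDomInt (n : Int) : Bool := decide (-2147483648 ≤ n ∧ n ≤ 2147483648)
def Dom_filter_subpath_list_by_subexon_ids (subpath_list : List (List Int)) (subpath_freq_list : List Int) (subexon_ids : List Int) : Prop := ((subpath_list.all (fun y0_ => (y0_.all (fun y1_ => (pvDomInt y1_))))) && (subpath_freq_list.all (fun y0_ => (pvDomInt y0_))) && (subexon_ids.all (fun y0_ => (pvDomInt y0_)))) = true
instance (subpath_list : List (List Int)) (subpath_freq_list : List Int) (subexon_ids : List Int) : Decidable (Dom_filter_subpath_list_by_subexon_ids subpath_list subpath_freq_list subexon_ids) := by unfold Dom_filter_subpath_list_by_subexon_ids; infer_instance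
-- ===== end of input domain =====

-- B replaces A's per-subpath set construction and index-table gathers by sorting subexon_ids once
-- and testing each node by hand-written binary search, in one loop building both outputs (objective: faster).

-- ===== PORT A =====
-- Literal port of A: build the list of qualifying indices, then gather the two output
-- lists by indexing.  pyGetD's default is only reached where Python raises IndexError,
-- which Pre_ excludes (for subpath_list the indices are always in range by construction).
def filter_subpath_list_by_subexon_ids (subpath_list : List (List Int)) (subpath_freq_list : List Int) (subexon_ids : List Int) : List (List Int) × List Int :=
  let indices : List Int :=
    (PySem.List.pyRange 0 (subpath_list.length : Int) 1).foldl
      (fun acc i =>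
        if PySem.Set.issubset (PySem.Set.ofList (PySem.List.pyGetD subpath_list i []))
            (PySem.Set.ofList subexon_ids) then acc ++ [i] else acc) []
  let subset_subpath_list := indices.map (fun idx => PySem.List.pyGetD subpath_list idx [])
  let subset_subpath_freq_list := indices.map (fun idx => PySem.List.pyGetD subpath_freq_list idx 0)
  (subset_subpath_list, subset_subpath_freq_list)

-- ===== PORT B =====
-- B's hand-written bisect_left while-loop, step for step (termination measure hi - lo).
-- ids[mid] is always in range when called with hi ≤ ids.length; getD's default is unreachable there.
def pvLb (ids : List Int) (x : Int) (lo hi : Nat) : Nat :=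
  if _h : lo < hi then
    let mid := (lo + hi) / 2
    if ids.getD mid 0 < x then pvLb ids x (mid + 1) hi else pvLb ids x lo mid
  else lo
termination_by hi - lo
decreasing_by all_goals omega

-- B's helper _contains: binary-search membership in the sorted ids list.
def pvBinContains (ids : List Int) (x : Int) : Bool :=
  let lo := pvLb ids x 0 ids.length
  decide (lo < ids.length) && (ids.getD lo 0 == x)

-- Literal port of B: sort subexon_ids once, then one fold over the zipped lists,
-- keeping a pair exactly when every node passes the binary-search membership test.
def filter_subpath_list_by_subexon_ids_alt (subpath_list : List (List Int)) (subpath_freq_list : List Int) (subexon_ids : List Int) : List (List Int) × List Int :=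
  let ids := PySem.List.sorted subexon_ids (fun v => v)
  (subpath_list.zip subpath_freq_list).foldl
    (fun acc p =>
      if p.1.all (fun x => pvBinContains ids x) then
        (acc.1 ++ [p.1], acc.2 ++ [p.2])
      else acc)
    ([], [])

-- ===== PRECONDITION & SPEC =====
-- Pre_ excludes exactly the inputs where A raises IndexError: a subpath passing the
-- subset test whose index is beyond the end of subpath_freq_list.
def Pre_filter_subpath_list_by_subexon_ids (subpath_list : List (List Int)) (subpath_freq_list : List Int) (subexon_ids : List Int) : Prop :=
  ∀ i : Nat, i < subpath_list.length →
    ((subpath_list.getD i []).all (fun x => subexon_ids.contains x) = true) →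
    i < subpath_freq_list.length
instance (subpath_list : List (List Int)) (subpath_freq_list : List Int) (subexon_ids : List Int) : Decidable (Pre_filter_subpath_list_by_subexon_ids subpath_list subpath_freq_list subexon_ids) := by unfold Pre_filter_subpath_list_by_subexon_ids; infer_instance

def pvWitness_filter_subpath_list_by_subexon_ids : List (List Int) × List Int × List Int := ([[1], [3]], [5, 7], [1, 2])

def Spec_filter_subpath_list_by_subexon_ids (subpath_list : List (List Int)) (subpath_freq_list : List Int) (subexon_ids : List Int) (out : List (List Int) × List Int) : Prop := out = filter_subpath_list_by_subexon_ids_alt subpath_list subpath_freq_list subexon_ids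
instance (subpath_list : List (List Int)) (subpath_freq_list : List Int) (subexon_ids : List Int) (out : List (List Int) × List Int) : Decidable (Spec_filter_subpath_list_by_subexon_ids subpath_list subpath_freq_list subexon_ids out) := by unfold Spec_filter_subpath_list_by_subexon_ids; infer_instance

-- ===== CLAIM =====
def Claim_equal_filter_subpath_list_by_subexon_ids : Prop := ∀ (subpath_list : List (List Int)) (subpath_freq_list : List Int) (subexon_ids : List Int), Dom_filter_subpath_list_by_subexon_ids subpath_list subpath_freq_list subexon_ids → Pre_filter_subpath_list_by_subexon_ids subpath_list subpath_freq_list subexon_ids → Spec_filter_subpath_list_by_subexon_ids subpath_list subpath_freq_list subexon_ids (filter_subpath_list_by_subexon_ids subpath_list subpath_freq_list subexon_ids)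

-- ===== LEMMAS AND PROOFS =====

-- Invariant of the binary-search loop: it stays inside [lo, hi] and preserves
-- "everything below is < x, everything at or above is ≥ x".
theorem pvLb_inv (ids : List Int) (x : Int) (hs : ids.Pairwise (· ≤ ·)) :
    ∀ (n lo hi : Nat), hi - lo ≤ n → lo ≤ hi → hi ≤ ids.length →
    (∀ j (hj : j < ids.length), j < lo → ids[j] < x) →
    (∀ j (hj : j < ids.length), hi ≤ j → x ≤ ids[j]) →
    (∀ j (hj : j < ids.length), j < pvLb ids x lo hi → ids[j] < x) ∧
    (∀ j (hj : j < ids.length), pvLb ids x lo hi ≤ j → x ≤ ids[j]) ∧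
    pvLb ids x lo hi ≤ ids.length := by
  have mono := List.pairwise_iff_getElem.mp hs
  intro n
  induction n with
  | zero =>
      intro lo hi hn hlh hhl Hlo Hhi
      have : lo = hi := by omega
      subst this
      rw [pvLb]; simp only [lt_irrefl, dite_false]
      exact ⟨Hlo, fun j hj h => Hhi j hj h, hhl⟩
  | succ n ih =>
      intro lo hi hn hlh hhl Hlo Hhi
      rw [pvLb]
      by_cases h : lo < hi
      · simp only [h, dite_true]
        have hmidlt : (lo + hi) / 2 < hi := by omega
        have hmidge : lo ≤ (lo + hi) / 2 := by omega
        have hmlen : (lo + hi) / 2 < ids.length := by omega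
        have hget : ids.getD ((lo + hi) / 2) 0 = ids[(lo + hi) / 2] := List.getD_eq_getElem _ _ hmlen
        by_cases hc : ids.getD ((lo + hi) / 2) 0 < x
        · simp only [hc, if_true]
          refine ih ((lo + hi) / 2 + 1) hi (by omega) (by omega) hhl ?_ Hhi
          intro j hj hjlt
          rcases Nat.lt_or_ge j ((lo + hi) / 2) with hj2 | hj2
          · exact lt_of_le_of_lt (mono j ((lo + hi) / 2) hj hmlen hj2) (hget ▸ hc)
          · have : j = (lo + hi) / 2 := by omega
            subst this; exact hget ▸ hc
        · simp only [hc, if_false]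
          refine ih lo ((lo + hi) / 2) (by omega) (by omega) (by omega) Hlo ?_
          intro j hj hjge
          have hx : x ≤ ids[(lo + hi) / 2] := by rw [← hget]; omega
          rcases Nat.lt_or_ge ((lo + hi) / 2) j with hj2 | hj2
          · exact le_trans hx (mono _ j hmlen hj hj2)
          · have : j = (lo + hi) / 2 := by omega
            subst this; exact hx
      · simp only [h, dite_false]
        exact ⟨Hlo, fun j hj hge => Hhi j hj (by omega), by omega⟩

-- On a sorted list, the binary-search membership test is membership.
theorem pvBinContains_eq_mem (ids : List Int) (x : Int) (hs : ids.Pairwise (· ≤ ·)) :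
    pvBinContains ids x = ids.contains x := by
  obtain ⟨Hlt, Hge, Hle⟩ :=
    pvLb_inv ids x hs ids.length 0 ids.length (by omega) (by omega) le_rfl
      (by intro j hj h; omega) (by intro j hj h; omega)
  set r := pvLb ids x 0 ids.length with hr
  have mono := List.pairwise_iff_getElem.mp hs
  simp only [pvBinContains, ← hr]
  by_cases hmem : x ∈ ids
  · obtain ⟨j, hj, hjx⟩ := List.mem_iff_getElem.mp hmem
    have hjr : r ≤ j := by
      by_contra hlt
      exact absurd (Hlt j hj (by omega)) (by rw [hjx]; exact lt_irrefl x)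
    have hrlen : r < ids.length := by omega
    have h1 : x ≤ ids[r] := Hge r hrlen le_rfl
    have h2 : ids[r] ≤ x := by
      rcases Nat.lt_or_ge r j with h | h
      · exact (mono r j hrlen hj h).trans (le_of_eq hjx)
      · have : r = j := by omega
        subst this; exact le_of_eq hjx
    have hx : ids[r] = x := by omega
    simp [hrlen, hx, hmem]
  · rcases Nat.lt_or_ge r ids.length with hrlen | hrlen
    · have hx : ids[r] ≠ x := fun heq => hmem (heq ▸ List.getElem_mem hrlen)
      simp [hrlen, hx, hmem]
    · simp [Nat.not_lt.mpr hrlen, hmem]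

-- A's subset test, as an all-membership Bool.
def pvCondA (ids sp : List Int) : Bool :=
  PySem.Set.issubset (PySem.Set.ofList sp) (PySem.Set.ofList ids)

theorem pvCondA_iff_all (ids sp : List Int) :
    pvCondA ids sp = true ↔ sp.all (fun x => ids.contains x) = true := by
  simp [pvCondA, PySem.Set.issubset_iff, PySem.Set.mem_ofList, List.all_eq_true]

-- B's branch condition equals A's subset test.
theorem pvCondB_eq_condA (ids sp : List Int) :
    (sp.all (fun x => pvBinContains (PySem.List.sorted ids (fun v => v)) x)) = pvCondA ids sp := by
  have hs : (PySem.List.sorted ids (fun v => v)).Pairwise (· ≤ ·) := by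
    simpa using PySem.List.sorted_pairwise ids (fun v => v)
  have hbc : ∀ x : Int, pvBinContains (PySem.List.sorted ids (fun v => v)) x = ids.contains x := by
    intro x
    rw [pvBinContains_eq_mem _ x hs]
    simp [PySem.List.mem_sorted]
  rw [show (fun x => pvBinContains (PySem.List.sorted ids (fun v => v)) x)
      = (fun x : Int => ids.contains x) from funext hbc]
  cases h : pvCondA ids sp
  · by_contra hb
    have hb' : sp.all (fun x : Int => ids.contains x) = true := by simpa using hb
    have := (pvCondA_iff_all ids sp).mpr hb'
    simp [h] at this
  · exact (pvCondA_iff_all ids sp).mp h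

-- B's pair-accumulator fold computes the two filtered projections (generic condition).
theorem pvFoldB (c : List Int → Bool) (z : List (List Int × Int)) (acc : List (List Int) × List Int) :
    z.foldl (fun acc p => if c p.1 then (acc.1 ++ [p.1], acc.2 ++ [p.2]) else acc) acc
      = (acc.1 ++ (z.filter (fun p => c p.1)).map Prod.fst,
         acc.2 ++ (z.filter (fun p => c p.1)).map Prod.snd) := by
  induction z generalizing acc with
  | nil => simp
  | cons p z ih =>
      by_cases h : c p.1 = true <;>
        simp [List.foldl_cons, h, ih]

-- The gathered-by-filtered-index lists equal the filtered-zip projections (under Pre_).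
theorem pvGather (c : List Int → Bool) : ∀ (sl : List (List Int)) (fl : List Int),
    (∀ i : Nat, i < sl.length → c (sl.getD i []) = true → i < fl.length) →
    (((List.range sl.length).filter (fun k => c (sl.getD k []))).map (fun k => sl.getD k [])
        = ((sl.zip fl).filter (fun p => c p.1)).map Prod.fst
     ∧ ((List.range sl.length).filter (fun k => c (sl.getD k []))).map (fun k => fl.getD k 0)
        = ((sl.zip fl).filter (fun p => c p.1)).map Prod.snd) := by
  intro sl
  induction sl with
  | nil => intro fl _; simp
  | cons x sl ih =>
      intro fl H
      cases fl with
      | nil =>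
          have hnone : ∀ k ∈ List.range (x :: sl).length,
              ¬ (c ((x :: sl).getD k []) = true) := by
            intro k hk hc
            exact absurd (H k (List.mem_range.mp hk) hc) (by simp)
          rw [List.filter_eq_nil_iff.mpr (by simpa using hnone)]
          simp
      | cons y fl =>
          have H' : ∀ i : Nat, i < sl.length → c (sl.getD i []) = true → i < fl.length := by
            intro i hi hc
            have h2 := H (i + 1) (by simp [hi]) (by simpa using hc)
            simp only [List.length_cons] at h2
            omega
          obtain ⟨ih1, ih2⟩ := ih fl H'
          have hrange : List.range (x :: sl).length = 0 :: (List.range sl.length).map Nat.succ := by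
            simp [List.range_succ_eq_map]
          have key1 : ((((List.range sl.length).map Nat.succ).filter
                (fun k => c ((x :: sl).getD k []))).map (fun k => (x :: sl).getD k []))
              = (((List.range sl.length).filter (fun k => c (sl.getD k []))).map
                  (fun k => sl.getD k [])) := by
            rw [List.filter_map, List.map_map]
            simp only [Function.comp_def, Nat.succ_eq_add_one, List.getD_cons_succ]
          have key2 : ((((List.range sl.length).map Nat.succ).filter
                (fun k => c ((x :: sl).getD k []))).map (fun k => (y :: fl).getD k 0))
              = (((List.range sl.length).filter (fun k => c (sl.getD k []))).map
                  (fun k => fl.getD k 0)) := by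
            rw [List.filter_map, List.map_map]
            simp only [Function.comp_def, Nat.succ_eq_add_one, List.getD_cons_succ]
          rw [hrange]
          by_cases h : c x = true
          · constructor
            · simp only [List.zip_cons_cons, List.filter_cons, List.getD_cons_zero, h,
                if_true, List.map_cons]
              rw [key1, ih1]
            · simp only [List.zip_cons_cons, List.filter_cons, List.getD_cons_zero, h,
                if_true, List.map_cons]
              rw [key2, ih2]
          · have h' : c x = false := by simpa using h
            constructor
            · simp only [List.zip_cons_cons, List.filter_cons, List.getD_cons_zero, h',
                Bool.false_eq_true, if_false]
              rw [key1, ih1]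
            · simp only [List.zip_cons_cons, List.filter_cons, List.getD_cons_zero, h',
                Bool.false_eq_true, if_false]
              rw [key2, ih2]

-- ===== VERDICT =====
theorem filter_subpath_list_by_subexon_ids_spec : Claim_equal_filter_subpath_list_by_subexon_ids := by
  intro sl fl ids _ hpre
  have Hc : ∀ i : Nat, i < sl.length → pvCondA ids (sl.getD i []) = true → i < fl.length := by
    intro i hi hc
    exact hpre i hi ((pvCondA_iff_all ids _).mp hc)
  obtain ⟨h1, h2⟩ := pvGather (pvCondA ids) sl fl Hc
  show _ = _
  simp only [filter_subpath_list_by_subexon_ids, filter_subpath_list_by_subexon_ids_alt]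
  rw [show (fun (acc : List (List Int) × List Int) (p : List Int × Int) =>
        if p.1.all (fun x => pvBinContains (PySem.List.sorted ids (fun v => v)) x) then
          (acc.1 ++ [p.1], acc.2 ++ [p.2]) else acc)
      = (fun acc p => if pvCondA ids p.1 then (acc.1 ++ [p.1], acc.2 ++ [p.2]) else acc) by
        funext acc p; rw [pvCondB_eq_condA]]
  rw [pvFoldB]
  rw [show (fun (acc : List Int) (i : Int) =>
        if PySem.Set.issubset (PySem.Set.ofList (PySem.List.pyGetD sl i []))
            (PySem.Set.ofList ids) then acc ++ [i] else acc)
      = (fun acc i => if pvCondA ids (PySem.List.pyGetD sl i []) then acc ++ [i] else acc) from rfl]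
  rw [PySem.List.foldl_append_if_eq_filter, PySem.List.pyRange_one]
  simp only [sub_zero, Int.toNat_natCast, zero_add, List.filter_map, List.map_map,
    Function.comp_def, PySem.List.pyGetD_natCast, List.nil_append]
  exact Prod.ext (by simpa using h1) (by simpa using h2)
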